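-- pv_equiv track=rewrite | github.com/christinemtrinh/NLP_Portfolio | Homework2/Homework2_cmt180004.py | pool_nouns
-- ===== SOURCE A (Python) =====
-- def pool_nouns(tokens, nouns):
--     """
--     Counts occurrences of nouns in tokens and keeps most frequent 500
--     Args -
--         nouns: list of words to count
--         tokens: body of text to count nouns in
--     Returns -
--         word_list: list of 50 words to be used in guessing game
--     """
--
--     # Count occurrences
--     noun_count = dict()
--     for i in tokens:
--         if i in nouns:
--             if i in noun_count:
--                 noun_count[i] = noun_count[i] + 1
--             else:
--                 noun_count[i] = 1
--
--     # Sort dictionary based on occurrences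
--     sorted_nouns = sorted(noun_count.items(), key=lambda x:x[1], reverse=True)
--     sorted_nouns = [x[0] for x in sorted_nouns] # Keep keys only
--     return sorted_nouns[:50]                    # Keep top 50 only
-- ===== SOURCE B (Python) =====
-- def pool_nouns(tokens, nouns):
--     # Count occurrences of nouns (set membership instead of list scan)
--     noun_set = set(nouns)
--     cnt = {}
--     for t in tokens:
--         if t in noun_set:
--             cnt[t] = cnt.get(t, 0) + 1
--     # Group words by their count (buckets keep first-appearance order)
--     buckets = {}
--     for w, c in cnt.items():
--         buckets.setdefault(c, []).append(w)
--     # Emit buckets from highest count down; this equals a stable reverse sort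
--     out = []
--     for c in sorted(buckets, reverse=True):
--         out.extend(buckets[c])
--     return out[:50]
-- ===== Notes on version B (the rewrite author's own statement) =====
-- stated objective: faster
-- what changed: Replaces the O(|nouns|) list-membership test per token with a set, and replaces the full stable reverse sort of all (word,count) items with grouping words into count-buckets and emitting buckets in descending count order.
import Mathlib
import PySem

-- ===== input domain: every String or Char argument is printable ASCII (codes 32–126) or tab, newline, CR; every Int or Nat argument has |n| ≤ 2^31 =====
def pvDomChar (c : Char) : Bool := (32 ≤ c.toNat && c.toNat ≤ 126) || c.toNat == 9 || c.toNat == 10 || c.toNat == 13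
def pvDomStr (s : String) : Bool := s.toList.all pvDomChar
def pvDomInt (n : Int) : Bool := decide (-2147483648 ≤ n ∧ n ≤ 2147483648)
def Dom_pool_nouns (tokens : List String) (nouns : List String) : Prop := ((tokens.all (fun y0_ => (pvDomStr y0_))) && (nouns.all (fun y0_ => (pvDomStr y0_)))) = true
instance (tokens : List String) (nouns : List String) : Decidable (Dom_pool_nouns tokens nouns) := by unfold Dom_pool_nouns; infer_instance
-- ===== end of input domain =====

-- B replaces A's per-token list scan of `nouns` with a set and A's full stable reverse sort of
-- the (word, count) items with count-buckets emitted in descending count order.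

-- ===== PORT A =====
-- 'i in nouns' is list membership; 'noun_count[i]' is looked up under the 'i in noun_count'
-- guard, so getD with default 0 is exact there; '[:50]' from the front is take 50.
def pool_nouns (tokens : List String) (nouns : List String) : List String :=
  let noun_count : PySem.Dict String Int := tokens.foldl (fun d i =>
    if nouns.contains i then
      if d.contains i then
        d.insert i (d.getD i 0 + 1)
      else
        d.insert i 1
    else d) PySem.Dict.empty
  let sorted_nouns := PySem.List.sorted noun_count.items (fun x => x.2) true
  let sorted_nouns := sorted_nouns.map (fun x => x.1)
  sorted_nouns.take 50

-- ===== PORT B =====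
-- 'setdefault(c, []).append(w)' is Dict.modify with default []; 'buckets[c]' is looked up for a
-- key of buckets, so getD with default [] is exact there.
def pool_nouns_alt (tokens : List String) (nouns : List String) : List String :=
  let noun_set : PySem.Set String := PySem.Set.ofList nouns
  let cnt : PySem.Dict String Int := tokens.foldl (fun d t =>
    if PySem.Set.contains noun_set t then d.insert t (d.getD t 0 + 1) else d) PySem.Dict.empty
  let buckets : PySem.Dict Int (List String) := cnt.items.foldl (fun b wc =>
    b.modify wc.2 [] (fun l => l ++ [wc.1])) PySem.Dict.empty
  let out := (PySem.List.sorted buckets.keys (fun c => c) true).foldl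
    (fun out c => out ++ buckets.getD c []) []
  out.take 50

-- ===== PRECONDITION & SPEC =====
def Spec_pool_nouns (tokens : List String) (nouns : List String) (out : List String) : Prop := out = pool_nouns_alt tokens nouns
instance (tokens : List String) (nouns : List String) (out : List String) : Decidable (Spec_pool_nouns tokens nouns out) := by unfold Spec_pool_nouns; infer_instance

-- ===== CLAIM (what is proved, stated in full; the proofs are below) =====
def Claim_equal_pool_nouns : Prop := ∀ (tokens : List String) (nouns : List String), Dom_pool_nouns tokens nouns → Spec_pool_nouns tokens nouns (pool_nouns tokens nouns)

-- ===== LEMMAS AND PROOFS =====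

theorem pv_getD_of_not_contains {κ ν : Type} [BEq κ] [LawfulBEq κ] (d : PySem.Dict κ ν) (k : κ) (dflt : ν)
    (h : d.contains k = false) : d.getD k dflt = dflt := by
  simp [PySem.Dict.getD, (PySem.Dict.get?_eq_none_iff_contains d k).2 h]

theorem pv_foldl_if_filter {α β : Type} (p : α → Bool) (g : β → α → β) (l : List α) (b : β) :
    l.foldl (fun s x => if p x then g s x else s) b = (l.filter p).foldl g b := by
  induction l generalizing b with
  | nil => rfl
  | cons x xs ih =>
    by_cases h : p x = true <;> simp [h, ih]

theorem pv_countA (tokens nouns : List String) :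
    tokens.foldl (fun d i =>
      if nouns.contains i then
        if d.contains i then d.insert i (d.getD i 0 + 1) else d.insert i 1
      else d) PySem.Dict.empty
    = PySem.Dict.counter (tokens.filter (fun t => nouns.contains t)) := by
  rw [← PySem.Dict.foldl_insert_getD_add_one_eq_counter]
  have h1 : ∀ (l : List String) (d : PySem.Dict String Int),
      l.foldl (fun d i =>
        if nouns.contains i then
          if d.contains i then d.insert i (d.getD i 0 + 1) else d.insert i 1
        else d) d
      = l.foldl (fun d i => if nouns.contains i then d.insert i (d.getD i 0 + 1) else d) d := by
    intro l
    induction l with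
    | nil => intro d; rfl
    | cons x xs ih =>
      intro d
      simp only [List.foldl_cons]
      by_cases hn : nouns.contains x = true
      · rw [if_pos hn, if_pos hn]
        by_cases hc : d.contains x = true
        · rw [if_pos hc]; exact ih _
        · have hc' : d.contains x = false := by simpa using hc
          rw [if_neg hc, pv_getD_of_not_contains d x 0 hc', zero_add]
          exact ih _
      · rw [if_neg hn, if_neg hn]; exact ih _
  rw [h1, pv_foldl_if_filter]

theorem pv_countB (tokens nouns : List String) :
    tokens.foldl (fun d t =>
      if PySem.Set.contains (PySem.Set.ofList nouns) t then d.insert t (d.getD t 0 + 1) else d)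
      PySem.Dict.empty
    = PySem.Dict.counter (tokens.filter (fun t => nouns.contains t)) := by
  rw [← PySem.Dict.foldl_insert_getD_add_one_eq_counter, pv_foldl_if_filter]
  congr 1
  apply List.filter_congr
  intro t _
  simp [PySem.Set.mem_ofList]

theorem pv_buckets_getD (items : List (String × Int)) (c : Int) :
    (items.foldl (fun b wc => b.modify wc.2 [] (fun l => l ++ [wc.1]))
      (PySem.Dict.empty : PySem.Dict Int (List String))).getD c []
    = (items.filter (fun wc => wc.2 == c)).map (fun wc => wc.1) := by
  have e : items.foldl (fun b wc => b.modify wc.2 [] (fun l => l ++ [wc.1]))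
        (PySem.Dict.empty : PySem.Dict Int (List String))
      = (items.map (fun wc => (wc.2, wc.1))).foldl
        (fun d p => d.modify p.1 [] (fun l => l ++ [p.2])) PySem.Dict.empty := by
    rw [List.foldl_map]
  rw [e, PySem.Dict.getD_foldl_modify_append]
  simp [List.filter_map, Function.comp_def]

theorem pv_buckets_keys (items : List (String × Int)) :
    (items.foldl (fun b wc => b.modify wc.2 [] (fun l => l ++ [wc.1]))
      (PySem.Dict.empty : PySem.Dict Int (List String))).keys
    = PySem.Set.ofList (items.map (fun wc => wc.2)) := by
  rw [PySem.Dict.keys_foldl_modify_key items (fun wc => wc.2) [] (fun b wc => (fun l => l ++ [wc.1]))]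
  simp [PySem.Set.update_nil_left]

theorem pv_insertBy_append {α : Type} (before : α → α → Bool) (x : α) (l1 l2 : List α)
    (h : ∀ y ∈ l1, before x y = false) :
    PySem.List.insertBy before x (l1 ++ l2) = l1 ++ PySem.List.insertBy before x l2 := by
  induction l1 with
  | nil => rfl
  | cons y ys ih =>
    have hy : before x y = false := h y (by simp)
    have ih' := ih (fun z hz => h z (by simp [hz]))
    cases l2 with
    | nil =>
      simp only [List.cons_append, PySem.List.insertBy, hy]
      simp [PySem.List.insertBy_of_forall_not_before before x ys (fun z hz => h z (by simp [hz]))]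
    | cons a as =>
      simp only [List.cons_append, PySem.List.insertBy, hy]
      simp only [Bool.false_eq_true, if_false, ih']
      rfl

theorem pv_insertBy_front {α : Type} (before : α → α → Bool) (x : α) (l : List α)
    (h : ∀ y ∈ l, before x y = true) :
    PySem.List.insertBy before x l = x :: l := by
  cases l with
  | nil => rfl
  | cons y ys => simp [PySem.List.insertBy, h y (by simp)]

theorem pv_step {α : Type} (key : α → Int) (ds : List Int)
    (hd : ds.Pairwise (fun a b => b < a)) (seen : List α) (x : α) (hx : key x ∈ ds) :
    PySem.List.insertBy (fun a b => decide (key b < key a)) x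
      (ds.flatMap (fun c => seen.filter (fun y => key y == c)))
    = ds.flatMap (fun c => (seen ++ [x]).filter (fun y => key y == c)) := by
  obtain ⟨l1, l2, rfl⟩ := List.append_of_mem hx
  have hp := hd
  rw [List.pairwise_append] at hp
  obtain ⟨hp1, hp2, hp12⟩ := hp
  rw [List.pairwise_cons] at hp2
  obtain ⟨hlt, _⟩ := hp2
  have hgt : ∀ c' ∈ l1, key x < c' := fun c' hc' => hp12 c' hc' (key x) (by simp)
  have hne1 : ∀ c' ∈ l1, key x ≠ c' := fun c' hc' => ne_of_lt (hgt c' hc')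
  have hne2 : ∀ c'' ∈ l2, key x ≠ c'' := fun c'' hc'' => (ne_of_lt (hlt c'' hc'')).symm
  simp only [List.flatMap_append, List.flatMap_cons]
  rw [← List.append_assoc]
  rw [pv_insertBy_append]
  · rw [pv_insertBy_front]
    · simp only [List.filter_append]
      have e1 : l1.flatMap (fun c => seen.filter (fun y => key y == c) ++ [x].filter (fun y => key y == c))
          = l1.flatMap (fun c => seen.filter (fun y => key y == c)) := by
        apply List.flatMap_congr
        intro c hc
        have : (key x == c) = false := by simp [hne1 c hc]
        simp [List.filter, this]
      have e2 : l2.flatMap (fun c => seen.filter (fun y => key y == c) ++ [x].filter (fun y => key y == c))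
          = l2.flatMap (fun c => seen.filter (fun y => key y == c)) := by
        apply List.flatMap_congr
        intro c hc
        have : (key x == c) = false := by simp [hne2 c hc]
        simp [List.filter, this]
      have e3 : (seen.filter (fun y => key y == key x) ++ [x].filter (fun y => key y == key x))
          = seen.filter (fun y => key y == key x) ++ [x] := by
        simp [List.filter]
      rw [e1, e2, e3]
      simp
    · intro y hy
      simp only [List.mem_flatMap, List.mem_filter] at hy
      obtain ⟨c, hc, _, hkey⟩ := hy
      have : key y = c := by simpa using hkey
      simp [this, hlt c hc]
  · intro y hy
    simp only [List.mem_append, List.mem_flatMap, List.mem_filter] at hy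
    rcases hy with ⟨c, hc, _, hkey⟩ | ⟨_, hkey⟩
    · have hk : key y = c := by simpa using hkey
      simp [hk, not_lt.2 (le_of_lt (hgt c hc))]
    · have hk : key y = key x := by simpa using hkey
      simp [hk]

theorem pv_sorted_rev_buckets {α : Type} (key : α → Int) (xs : List α) (ds : List Int)
    (hd : ds.Pairwise (fun a b => b < a)) (hc : ∀ x ∈ xs, key x ∈ ds) :
    PySem.List.sorted xs key true = ds.flatMap (fun c => xs.filter (fun x => key x == c)) := by
  rw [PySem.List.sorted_rev_eq_foldl_insertBy]
  have inv : ∀ (l seen : List α), (∀ x ∈ l, key x ∈ ds) →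
      l.foldl (fun acc x => PySem.List.insertBy (fun a b => decide (key b < key a)) x acc)
        (ds.flatMap (fun c => seen.filter (fun y => key y == c)))
      = ds.flatMap (fun c => (seen ++ l).filter (fun y => key y == c)) := by
    intro l
    induction l with
    | nil => intro seen _; simp
    | cons x l ih =>
      intro seen hl
      simp only [List.foldl_cons]
      rw [pv_step key ds hd seen x (hl x (by simp))]
      have := ih (seen ++ [x]) (fun z hz => hl z (by simp [hz]))
      simpa using this
  have h0 := inv xs [] hc
  simp only [List.nil_append] at h0
  rw [← h0]
  congr 1
  simp

theorem pv_ds_desc (m : List Int) :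
    (PySem.List.sorted (PySem.Set.ofList m) (fun c => c) true).Pairwise (fun a b => b < a) := by
  have h : PySem.List.sorted (PySem.Set.ofList m) (fun c => c) true
      = (PySem.List.sorted (PySem.Set.ofList m) (fun c => c) false).reverse := by
    apply PySem.List.sorted_rev_eq_of_perm_of_pairwise_gt
    · exact (List.reverse_perm _).trans (PySem.List.sorted_perm _ _ _)
    · exact List.pairwise_reverse.2 (PySem.List.sorted_ofList_pairwise_lt m)
  rw [h]
  exact List.pairwise_reverse.2 (PySem.List.sorted_ofList_pairwise_lt m)

theorem pv_ds_cover (items : List (String × Int)) (x : String × Int) (hx : x ∈ items) :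
    x.2 ∈ PySem.List.sorted (PySem.Set.ofList (items.map (fun wc => wc.2))) (fun c => c) true := by
  rw [PySem.List.mem_sorted, PySem.Set.mem_ofList]
  exact List.mem_map.2 ⟨x, hx, rfl⟩

theorem pv_main (tokens nouns : List String) :
    pool_nouns tokens nouns = pool_nouns_alt tokens nouns := by
  unfold pool_nouns pool_nouns_alt
  dsimp only
  rw [pv_countA, pv_countB]
  set items := (PySem.Dict.counter (tokens.filter (fun t => nouns.contains t))).items with hitems
  rw [pv_buckets_keys]
  rw [PySem.List.foldl_append_eq_flatMap, List.nil_append]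
  rw [pv_sorted_rev_buckets (fun x => x.2) items
        (PySem.List.sorted (PySem.Set.ofList (items.map (fun wc => wc.2))) (fun c => c) true)
        (pv_ds_desc _) (fun x hx => pv_ds_cover items x hx)]
  rw [List.map_flatMap]
  congr 1
  apply List.flatMap_congr
  intro c _
  rw [pv_buckets_getD]

-- ===== VERDICT (by name: the statement is the Claim_ definition above) =====
theorem pool_nouns_spec : Claim_equal_pool_nouns := by
  intro tokens nouns _
  unfold Spec_pool_nouns
  exact pv_main tokens nouns
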